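-- pv_equiv track=rewrite | github.com/quangnguyen2605/DuDoanONhiemKK | data_generator.py | classify_pollution_level
-- ===== SOURCE A (Python) =====
-- def classify_pollution_level(aqi_values):
--     """
--     Classify AQI values into pollution levels
--     """
--     levels = []
--     for aqi in aqi_values:
--         if aqi <= 50:
--             levels.append("Tốt")
--         elif aqi <= 100:
--             levels.append("Trung Bình")
--         elif aqi <= 150:
--             levels.append("Kém")
--         elif aqi <= 200:
--             levels.append("Xấu")
--         elif aqi <= 300:
--             levels.append("Rất Xấu")
--         else:
--             levels.append("Nguy Hiểm")
--     return levels
-- ===== SOURCE B (Python) =====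
-- _THRESHOLDS = [50, 100, 150, 200, 300]
-- _LABELS = ["T\u1ed1t", "Trung B\u00ecnh", "K\u00e9m", "X\u1ea5u", "R\u1ea5t X\u1ea5u", "Nguy Hi\u1ec3m"]
--
--
-- def _bisect_left(a, x):
--     # standard binary search: first index i with a[i] >= x
--     lo, hi = 0, len(a)
--     while lo < hi:
--         mid = (lo + hi) // 2
--         if a[mid] < x:
--             lo = mid + 1
--         else:
--             hi = mid
--     return lo
--
--
-- def classify_pollution_level(aqi_values):
--     return [_LABELS[_bisect_left(_THRESHOLDS, x)] for x in aqi_values]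
-- ===== Notes on version B (the rewrite author's own statement) =====
-- stated objective: idiomatic
-- what changed: Replaces the six-way if-elif cascade with a binary-search (bisect_left) lookup into precomputed parallel threshold/label tables.
import Mathlib
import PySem

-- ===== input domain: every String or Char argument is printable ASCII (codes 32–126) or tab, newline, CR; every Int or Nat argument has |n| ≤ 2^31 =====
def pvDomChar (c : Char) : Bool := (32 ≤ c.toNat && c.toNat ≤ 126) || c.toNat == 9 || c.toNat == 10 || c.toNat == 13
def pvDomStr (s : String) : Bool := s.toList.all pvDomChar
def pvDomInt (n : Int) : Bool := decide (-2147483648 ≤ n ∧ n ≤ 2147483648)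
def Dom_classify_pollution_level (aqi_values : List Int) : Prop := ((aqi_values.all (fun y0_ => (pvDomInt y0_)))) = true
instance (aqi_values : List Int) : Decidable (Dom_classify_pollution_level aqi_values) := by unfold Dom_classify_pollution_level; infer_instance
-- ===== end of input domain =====

-- B replaces A's six-way if-elif cascade with a binary-search (bisect_left) lookup into precomputed parallel threshold/label tables (idiomatic; same O(n) cost).
-- ===== PORT A =====
def classify_pollution_level (aqi_values : List Int) : List String :=
  aqi_values.foldl (fun levels aqi =>
    if aqi ≤ 50 then levels ++ ["Tốt"]
    else if aqi ≤ 100 then levels ++ ["Trung Bình"]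
    else if aqi ≤ 150 then levels ++ ["Kém"]
    else if aqi ≤ 200 then levels ++ ["Xấu"]
    else if aqi ≤ 300 then levels ++ ["Rất Xấu"]
    else levels ++ ["Nguy Hiểm"]) []

-- ===== PORT B =====
def pvThresholds : List Int := [50, 100, 150, 200, 300]
def pvLabels : List String := ["Tốt", "Trung Bình", "Kém", "Xấu", "Rất Xấu", "Nguy Hiểm"]

-- hand-written _bisect_left loop from Source B (lo/hi narrowing); terminates since hi - lo shrinks.
-- Python's a[mid] is always in range here (lo < hi ≤ len a), so getD's default is never used.
def pvBisectGo (a : List Int) (x : Int) (lo hi : Nat) : Nat :=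
  if _h : lo < hi then
    let mid := (lo + hi) / 2
    if a.getD mid 0 < x then pvBisectGo a x (mid + 1) hi else pvBisectGo a x lo mid
  else lo
termination_by hi - lo
decreasing_by all_goals omega

def pvBisectLeft (a : List Int) (x : Int) : Nat := pvBisectGo a x 0 a.length

def classify_pollution_level_alt (aqi_values : List Int) : List String :=
  aqi_values.map (fun x => pvLabels.getD (pvBisectLeft pvThresholds x) "")

-- ===== PRECONDITION & SPEC =====
def Spec_classify_pollution_level (aqi_values : List Int) (out : List String) : Prop := out = classify_pollution_level_alt aqi_values
instance (aqi_values : List Int) (out : List String) : Decidable (Spec_classify_pollution_level aqi_values out) := by unfold Spec_classify_pollution_level; infer_instance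

-- ===== CLAIM (what is proved, stated in full; the proofs are below) =====
def Claim_equal_classify_pollution_level : Prop := ∀ (aqi_values : List Int), Dom_classify_pollution_level aqi_values → Spec_classify_pollution_level aqi_values (classify_pollution_level aqi_values)

-- ===== LEMMAS AND PROOFS =====
lemma pv_step (a : List Int) (x : Int) (lo hi : Nat) (h : lo < hi) :
    pvBisectGo a x lo hi =
      if a.getD ((lo+hi)/2) 0 < x then pvBisectGo a x ((lo+hi)/2 + 1) hi
      else pvBisectGo a x lo ((lo+hi)/2) := by
  rw [pvBisectGo]; simp [h]

lemma pv_base (a : List Int) (x : Int) (lo : Nat) : pvBisectGo a x lo lo = lo := by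
  rw [pvBisectGo]; simp

-- B's per-element label equals A's if-elif cascade
lemma pv_label_eq (x : Int) :
    pvLabels.getD (pvBisectLeft pvThresholds x) "" =
    (if x ≤ 50 then "Tốt"
     else if x ≤ 100 then "Trung Bình"
     else if x ≤ 150 then "Kém"
     else if x ≤ 200 then "Xấu"
     else if x ≤ 300 then "Rất Xấu"
     else "Nguy Hiểm") := by
  unfold pvBisectLeft pvThresholds
  norm_num
  split_ifs with h1 h2 h3 h4 h5 <;>
  · repeat
      first
        | rw [pv_base]
        | (rw [pv_step _ _ _ _ (by omega)]
           norm_num [pvThresholds]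
           first
             | rw [if_pos (show (50:Int) < x by omega)] | rw [if_neg (show ¬(50:Int) < x by omega)]
             | rw [if_pos (show (100:Int) < x by omega)] | rw [if_neg (show ¬(100:Int) < x by omega)]
             | rw [if_pos (show (150:Int) < x by omega)] | rw [if_neg (show ¬(150:Int) < x by omega)]
             | rw [if_pos (show (200:Int) < x by omega)] | rw [if_neg (show ¬(200:Int) < x by omega)]
             | rw [if_pos (show (300:Int) < x by omega)] | rw [if_neg (show ¬(300:Int) < x by omega)])
    rfl

-- A's append-accumulator fold is map
lemma pv_foldl_append {α β : Type} (f : α → β) (l : List α) (acc : List β) :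
    l.foldl (fun a x => a ++ [f x]) acc = acc ++ l.map f := by
  induction l generalizing acc with
  | nil => simp
  | cons y ys ih => simp [List.foldl, ih]

-- ===== VERDICT =====
theorem classify_pollution_level_spec : Claim_equal_classify_pollution_level := by
  intro aqi_values _
  unfold Spec_classify_pollution_level classify_pollution_level classify_pollution_level_alt
  have h :
      (fun (levels : List String) (aqi : Int) =>
        if aqi ≤ (50:Int) then levels ++ ["Tốt"]
        else if aqi ≤ 100 then levels ++ ["Trung Bình"]
        else if aqi ≤ 150 then levels ++ ["Kém"]
        else if aqi ≤ 200 then levels ++ ["Xấu"]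
        else if aqi ≤ 300 then levels ++ ["Rất Xấu"]
        else levels ++ ["Nguy Hiểm"]) = fun levels aqi => levels ++
          [if aqi ≤ 50 then "Tốt" else if aqi ≤ 100 then "Trung Bình" else if aqi ≤ 150 then "Kém"
           else if aqi ≤ 200 then "Xấu" else if aqi ≤ 300 then "Rất Xấu" else "Nguy Hiểm"] := by
    funext levels aqi; split_ifs <;> rfl
  rw [h, pv_foldl_append]
  simp only [List.nil_append]
  exact List.map_congr_left (fun x _ => (pv_label_eq x).symm)
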